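-- pv_equiv track=rewrite | github.com/emw314159/badass_tools_from_emily | html.py | display_alt_amplicon_design_html
-- ===== SOURCE A (Python) =====
-- def display_alt_amplicon_design_html(result_as_text, header=None):
--     html = ''
--     if header != None:
--         html += '<h3>' + header + '</h3>'
--     html += '<p style="font-family : monospace;">'
--     for line in result_as_text.split('\n'):
--         html += line.replace(' ', '&nbsp;') + '<br/>'
--     html += '</p>'
--     return html
-- ===== SOURCE B (Python) =====
-- def display_alt_amplicon_design_html(result_as_text, header=None):
--     head = '' if header is None else '<h3>' + header + '</h3>'
--     body = result_as_text.replace(' ', '&nbsp;').replace('\n', '<br/>')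
--     return head + '<p style="font-family : monospace;">' + body + '<br/></p>'
-- ===== Notes on version B (the rewrite author's own statement) =====
-- stated objective: simpler
-- what changed: Replaced the per-line split/escape/append loop with two whole-string replace calls (space to its HTML entity, newline to a break tag) plus one trailing break tag, so B does no line splitting and no iteration.
import Mathlib
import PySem

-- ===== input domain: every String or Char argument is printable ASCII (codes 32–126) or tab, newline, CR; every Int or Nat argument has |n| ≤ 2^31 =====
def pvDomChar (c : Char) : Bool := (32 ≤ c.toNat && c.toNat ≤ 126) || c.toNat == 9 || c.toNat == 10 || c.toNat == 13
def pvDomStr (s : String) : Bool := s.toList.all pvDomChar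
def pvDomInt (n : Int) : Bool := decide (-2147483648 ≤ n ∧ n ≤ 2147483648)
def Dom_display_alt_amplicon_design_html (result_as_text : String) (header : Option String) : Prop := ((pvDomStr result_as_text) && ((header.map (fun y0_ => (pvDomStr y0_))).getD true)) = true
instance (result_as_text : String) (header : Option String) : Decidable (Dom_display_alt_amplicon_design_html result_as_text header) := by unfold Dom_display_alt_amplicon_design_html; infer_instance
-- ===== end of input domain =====

-- B replaces A's per-line split/escape/append loop with two whole-string replaces plus one trailing break tag (simpler, same result).


-- ===== PORT A =====
def display_alt_amplicon_design_html (result_as_text : String) (header : Option String) : String :=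
  -- html = '' ; if header != None: html += '<h3>' + header + '</h3>'
  let html : List Char :=
    match header with
    | some h => "<h3>".toList ++ h.toList ++ "</h3>".toList
    | none => []
  -- html += '<p style="font-family : monospace;">'
  let html := html ++ "<p style=\"font-family : monospace;\">".toList
  -- for line in result_as_text.split('\n'): html += line.replace(' ', '&nbsp;') + '<br/>'
  let html := (PySem.Chars.splitOn result_as_text.toList "\n".toList).foldl
    (fun html line => html ++ PySem.Chars.replace line " ".toList "&nbsp;".toList ++ "<br/>".toList) html
  -- html += '</p>'
  String.ofList (html ++ "</p>".toList)

-- ===== PORT B =====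
def display_alt_amplicon_design_html_alt (result_as_text : String) (header : Option String) : String :=
  -- head = '' if header is None else '<h3>' + header + '</h3>'
  let head : List Char :=
    match header with
    | some h => "<h3>".toList ++ h.toList ++ "</h3>".toList
    | none => []
  -- body = result_as_text.replace(' ', '&nbsp;').replace('\n', '<br/>')
  let body := PySem.Chars.replace (PySem.Chars.replace result_as_text.toList " ".toList "&nbsp;".toList)
      "\n".toList "<br/>".toList
  String.ofList (head ++ "<p style=\"font-family : monospace;\">".toList ++ body ++ "<br/></p>".toList)

-- ===== PRECONDITION & SPEC =====
def Spec_display_alt_amplicon_design_html (result_as_text : String) (header : Option String) (out : String) : Prop := out = display_alt_amplicon_design_html_alt result_as_text header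
instance (result_as_text : String) (header : Option String) (out : String) : Decidable (Spec_display_alt_amplicon_design_html result_as_text header out) := by unfold Spec_display_alt_amplicon_design_html; infer_instance

-- ===== CLAIM (what is proved, stated in full; the proofs are below) =====
def Claim_equal_display_alt_amplicon_design_html : Prop := ∀ (result_as_text : String) (header : Option String), Dom_display_alt_amplicon_design_html result_as_text header → Spec_display_alt_amplicon_design_html result_as_text header (display_alt_amplicon_design_html result_as_text header)

-- ===== LEMMAS AND PROOFS =====

-- single-character escapes used to characterise the two programs
def escSp (c : Char) : List Char := if c = ' ' then "&nbsp;".toList else [c]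
def escNl (c : Char) : List Char := if c = '\n' then "<br/>".toList else [c]
def escAll (c : Char) : List Char :=
  if c = '\n' then "<br/>".toList else if c = ' ' then "&nbsp;".toList else [c]

-- reference split on newline (split('\n') never drops the empty trailing piece)
def splitNl : List Char → List (List Char)
  | [] => [[]]
  | c :: t => if c = '\n' then [] :: splitNl t else (splitNl t).modifyHead (c :: ·)

theorem modifyHead_fun_id {α : Type} (l : List α) : l.modifyHead (fun x => x) = l := by
  cases l <;> simp

theorem replace_go_single (c : Char) (new : List Char) :
    ∀ (fuel : Nat) (l acc : List Char), l.length ≤ fuel →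
      PySem.Chars.replace.go [c] new fuel l acc
        = acc.reverse ++ l.flatMap (fun x => if x = c then new else [x]) := by
  intro fuel
  induction fuel with
  | zero =>
    intro l acc h
    have : l = [] := List.eq_nil_of_length_eq_zero (Nat.le_zero.mp h)
    subst this
    simp [PySem.Chars.replace.go]
  | succ n ih =>
    intro l acc h
    cases l with
    | nil => simp [PySem.Chars.replace.go]
    | cons x t =>
      by_cases hx : x = c
      · subst hx
        have hp : [x].isPrefixOf (x :: t) = true := by simp [List.isPrefixOf]
        simp only [PySem.Chars.replace.go, hp]
        rw [ih _ _ (by simpa using Nat.le_of_succ_le_succ h)]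
        simp
      · have hp : [c].isPrefixOf (x :: t) = false := by
          simp [List.isPrefixOf]
          exact fun hc => (hx hc.symm).elim
        simp only [PySem.Chars.replace.go, hp, Bool.false_eq_true, if_false]
        rw [ih _ _ (by simpa using Nat.le_of_succ_le_succ h)]
        simp [hx]

theorem replace_single (c : Char) (new : List Char) (l : List Char) :
    PySem.Chars.replace l [c] new = l.flatMap (fun x => if x = c then new else [x]) := by
  simp only [PySem.Chars.replace, List.isEmpty]
  rw [replace_go_single c new l.length l [] (le_refl _)]
  simp

theorem splitOn_go_nl :
    ∀ (fuel : Nat) (l cur : List Char) (acc : List (List Char)), l.length ≤ fuel →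
      PySem.Chars.splitOn.go ['\n'] fuel l cur acc
        = acc.reverse ++ (splitNl l).modifyHead (cur.reverse ++ ·) := by
  intro fuel
  induction fuel with
  | zero =>
    intro l cur acc h
    have : l = [] := List.eq_nil_of_length_eq_zero (Nat.le_zero.mp h)
    subst this
    simp [PySem.Chars.splitOn.go, splitNl]
  | succ n ih =>
    intro l cur acc h
    cases l with
    | nil => simp [PySem.Chars.splitOn.go, splitNl]
    | cons x t =>
      by_cases hx : x = '\n'
      · subst hx
        have hp : ['\n'].isPrefixOf ('\n' :: t) = true := by simp [List.isPrefixOf]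
        simp only [PySem.Chars.splitOn.go, hp]
        rw [ih _ _ _ (by simpa using Nat.le_of_succ_le_succ h)]
        simp [splitNl, modifyHead_fun_id]
      · have hp : ['\n'].isPrefixOf (x :: t) = false := by
          simp [List.isPrefixOf]
          exact fun hc => (hx hc.symm).elim
        simp only [PySem.Chars.splitOn.go, hp, Bool.false_eq_true, if_false]
        rw [ih _ _ _ (by simpa using Nat.le_of_succ_le_succ h)]
        simp only [splitNl, if_neg hx]
        rw [List.modifyHead_modifyHead]
        have hcomp : ((fun x => cur.reverse ++ x) ∘ (fun l => x :: l))
            = fun l => (x :: cur).reverse ++ l := by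
          funext z; simp
        rw [hcomp]

theorem splitOn_nl (l : List Char) :
    PySem.Chars.splitOn l ['\n'] = splitNl l := by
  simp only [PySem.Chars.splitOn]
  rw [splitOn_go_nl (l.length + 1) l [] [] (Nat.le_succ _)]
  simp [modifyHead_fun_id]

theorem splitNl_ne_nil (l : List Char) : splitNl l ≠ [] := by
  cases l with
  | nil => simp [splitNl]
  | cons x t =>
    simp only [splitNl]
    split
    · simp
    · intro h
      exact splitNl_ne_nil t (by simpa using List.modifyHead_eq_nil_iff.mp h)

theorem escSp_flatMap_escNl (c : Char) : (escSp c).flatMap escNl = escAll c := by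
  by_cases hs : c = ' '
  · subst hs; decide
  · by_cases hn : c = '\n'
    · subst hn; decide
    · simp [escSp, escNl, escAll, hs, hn]

theorem foldl_splitNl (br : List Char) (hbr : br = "<br/>".toList) :
    ∀ (l cur pre : List Char),
      ((splitNl l).modifyHead (cur ++ ·)).foldl
          (fun html line => html ++ line.flatMap escSp ++ br) pre
        = pre ++ cur.flatMap escSp ++ l.flatMap escAll ++ br := by
  intro l
  induction l with
  | nil => intro cur pre; simp [splitNl]
  | cons x t ih =>
    intro cur pre
    by_cases hx : x = '\n'
    · subst hx
      have ihtop : ∀ pre : List Char,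
          (splitNl t).foldl (fun html line => html ++ line.flatMap escSp ++ br) pre
            = pre ++ t.flatMap escAll ++ br := fun pre => by
        simpa [modifyHead_fun_id] using ih [] pre
      rw [show splitNl ('\n' :: t) = [] :: splitNl t from by simp [splitNl]]
      rw [List.modifyHead_cons, List.foldl_cons, ihtop]
      have hg : escAll '\n' = br := by rw [hbr]; decide
      simp [hg]
    · simp only [splitNl, if_neg hx]
      rw [List.modifyHead_modifyHead]
      have hc : (fun l => cur ++ x :: l) = fun l => (cur ++ [x]) ++ l := by
        funext z; simp
      rw [show ((fun a => cur ++ a) ∘ (fun a => x :: a)) = fun l => (cur ++ [x]) ++ l by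
        funext z; simp]
      rw [ih (cur ++ [x]) pre]
      have hg : escAll x = escSp x := by simp [escAll, escSp, hx]
      simp [hg]

theorem foldl_splitNl_top (br : List Char) (hbr : br = "<br/>".toList)
    (l pre : List Char) :
    (splitNl l).foldl (fun html line => html ++ line.flatMap escSp ++ br) pre
      = pre ++ l.flatMap escAll ++ br := by
  simpa [modifyHead_fun_id] using foldl_splitNl br hbr l [] pre

-- ===== VERDICT (by name: the statement is the Claim_ definition above) =====
theorem display_alt_amplicon_design_html_spec : Claim_equal_display_alt_amplicon_design_html := by
  intro result_as_text header _
  unfold Spec_display_alt_amplicon_design_html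
  unfold display_alt_amplicon_design_html display_alt_amplicon_design_html_alt
  have hsep : "\n".toList = ['\n'] := by decide
  have hsp : " ".toList = [' '] := by decide
  simp only [hsep, hsp, splitOn_nl, replace_single]
  rw [show (fun x => if x = ' ' then "&nbsp;".toList else [x]) = escSp from rfl]
  rw [foldl_splitNl_top "<br/>".toList rfl]
  have hcomp : List.flatMap (fun x => if x = '\n' then "<br/>".toList else [x])
        (List.flatMap escSp result_as_text.toList)
      = List.flatMap escAll result_as_text.toList := by
    rw [show (fun x : Char => if x = '\n' then "<br/>".toList else [x]) = escNl from rfl]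
    rw [List.flatMap_assoc]
    simp only [escSp_flatMap_escNl]
  rw [hcomp]
  simp [show "<br/></p>".toList = "<br/>".toList ++ "</p>".toList from by decide]
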